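-- pv_equiv track=rewrite | github.com/Romariozh/QA_Automation_22 | HW8/My_classes.py | cinema_cashier
-- ===== SOURCE A (Python) =====
-- def determ_age_in_str(age_string: int) -> str:
--     """
--     The function determines the age and returns a string describing the age like 'рік', 'роки', 'років'
--     """
--     gradient_str_age = {
--         'рік': (1, 1),
--         'роки': (2, 3, 4),
--     }
--     string_add_age = 'років'
--     for key in gradient_str_age.keys():
--         if age_string % 10 in gradient_str_age[key] and age_string % 100 not in (11, 12, 13, 14):
--             string_add_age = key
--             break
--     return string_add_age
--
-- def cinema_cashier(client_age: int) -> str: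
--     string_add_age = determ_age_in_str(client_age)
--     # For create list of nice age like 11, 22, 33, 44 .... to 999
--     element = 11
--     nice_age = []
--     while element <= 1000:
--         nice_age.append(element)
--         element += 11
--         if element % 10 == 0:
--             element += 1
--         if element > 111:
--             element += 100
--     # checking conditions according to the task + answer for very old people
--     if client_age in nice_age:
--         response = 'О, вам {} {}! Який цікавий вік!'
--     elif client_age < 7:
--         response = 'Тобі ж {} {}! Де твої батьки?'
--     elif client_age < 16:
--         response = 'Тобі лише {} {}, а це фільм для дорослих!'
--     elif client_age <= 65:
--         response = 'Незважаючи на те що вам {} {}, білетів всеодно нема!'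
--     elif 65 < client_age < 100:
--         response = 'Вам {} {}? Покажіть пенсійне посвідчення!'
--     else:
--         response = 'Вам {} {}, відвідування кінотеатру небезбечно для вашого здоров\'я!'
--     return response.format(str(client_age), string_add_age)
-- ===== SOURCE B (Python) =====
-- def cinema_cashier(client_age: int) -> str:
--     # word: closed-form instead of the dict loop of determ_age_in_str
--     d = client_age % 10
--     h = client_age % 100
--     if d == 1 and h != 11:
--         word = 'рік'
--     elif d in (2, 3, 4) and h not in (12, 13, 14):
--         word = 'роки'
--     else:
--         word = 'років'
--     s = str(client_age)
--     # 'nice' ages (2- and 3-digit repdigits) tested arithmetically instead of building a list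
--     if (11 <= client_age <= 99 and client_age % 11 == 0) or \
--        (111 <= client_age <= 999 and client_age % 111 == 0):
--         return 'О, вам {} {}! Який цікавий вік!'.format(s, word)
--     if client_age < 7:
--         return 'Тобі ж {} {}! Де твої батьки?'.format(s, word)
--     if client_age < 16:
--         return 'Тобі лише {} {}, а це фільм для дорослих!'.format(s, word)
--     if client_age <= 65:
--         return 'Незважаючи на те що вам {} {}, білетів всеодно нема!'.format(s, word)
--     if client_age < 100:
--         return 'Вам {} {}? Покажіть пенсійне посвідчення!'.format(s, word)
--     return 'Вам {} {}, відвідування кінотеатру небезбечно для вашого здоров\'я!'.format(s, word)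
-- ===== Notes on version B (the rewrite author's own statement) =====
-- stated objective: simpler
-- what changed: Replaces the while-loop that materialises the list of 'nice' repdigit ages with a closed-form arithmetic range-and-divisibility test, and the dict-driven for-loop in determ_age_in_str with a direct conditional on the last one and two decimal digits of the age.
import Mathlib
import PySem

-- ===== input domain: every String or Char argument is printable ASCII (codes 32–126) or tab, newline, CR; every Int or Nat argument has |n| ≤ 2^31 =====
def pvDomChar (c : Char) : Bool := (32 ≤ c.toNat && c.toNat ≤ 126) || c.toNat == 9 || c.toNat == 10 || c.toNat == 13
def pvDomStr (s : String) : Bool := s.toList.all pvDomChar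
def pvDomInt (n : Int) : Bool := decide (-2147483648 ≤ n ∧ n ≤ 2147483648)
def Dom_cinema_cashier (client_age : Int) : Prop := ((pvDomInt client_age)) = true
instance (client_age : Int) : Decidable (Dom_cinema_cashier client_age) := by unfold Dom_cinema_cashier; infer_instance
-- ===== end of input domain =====

-- B replaces A's while-loop building the list of 'nice' repdigit ages by a closed-form
-- arithmetic test and the dict-driven word helper by a direct conditional (objective: simpler).


-- shared port of Python's '<template>.format(a, b)' for templates whose only braces are '{}' holes
def pyFormatChars : List Char → List String → List Char
  | [], _ => []
  | '{' :: '}' :: rest, a :: args => a.toList ++ pyFormatChars rest args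
  | c :: rest, args => c :: pyFormatChars rest args

def format2 (t a b : String) : String := String.ofList (pyFormatChars t.toList [a, b])

-- ===== PORT A =====
-- the for-loop (with break) over gradient_str_age.keys()
def determLoop (age_string : Int) : List (String × List Int) → String
  | [] => "років"
  | (k, v) :: rest =>
      if PySem.Int.mod age_string 10 ∈ v ∧ PySem.Int.mod age_string 100 ∉ [(11:Int), 12, 13, 14]
      then k else determLoop age_string rest

def determ_age_in_str (age_string : Int) : String :=
  determLoop age_string [("рік", [1, 1]), ("роки", [2, 3, 4])]

-- the while-loop building nice_age; fuel only guards termination (element grows by ≥ 11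
-- each pass, so 91 iterations always suffice before element > 1000)
def buildNice : Nat → Int → List Int → List Int
  | 0, _, acc => acc
  | fuel + 1, element, acc =>
      if element ≤ 1000 then
        let acc' := acc ++ [element]
        let e1 := element + 11
        let e2 := if PySem.Int.mod e1 10 = 0 then e1 + 1 else e1
        let e3 := if e2 > 111 then e2 + 100 else e2
        buildNice fuel e3 acc'
      else acc

def cinema_cashier (client_age : Int) : String :=
  let string_add_age := determ_age_in_str client_age
  let nice_age := buildNice 91 11 []
  let response :=
    if client_age ∈ nice_age then "О, вам {} {}! Який цікавий вік!"
    else if client_age < 7 then "Тобі ж {} {}! Де твої батьки?"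
    else if client_age < 16 then "Тобі лише {} {}, а це фільм для дорослих!"
    else if client_age ≤ 65 then "Незважаючи на те що вам {} {}, білетів всеодно нема!"
    else if 65 < client_age ∧ client_age < 100 then "Вам {} {}? Покажіть пенсійне посвідчення!"
    else "Вам {} {}, відвідування кінотеатру небезбечно для вашого здоров'я!"
  format2 response (PySem.Int.toStr client_age) string_add_age

-- ===== PORT B =====
def cinema_cashier_alt (client_age : Int) : String :=
  let d := PySem.Int.mod client_age 10
  let h := PySem.Int.mod client_age 100
  let word :=
    if d = 1 ∧ h ≠ 11 then "рік"
    else if d ∈ [(2:Int), 3, 4] ∧ h ∉ [(12:Int), 13, 14] then "роки"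
    else "років"
  let s := PySem.Int.toStr client_age
  if (11 ≤ client_age ∧ client_age ≤ 99 ∧ PySem.Int.mod client_age 11 = 0) ∨
     (111 ≤ client_age ∧ client_age ≤ 999 ∧ PySem.Int.mod client_age 111 = 0) then
    format2 "О, вам {} {}! Який цікавий вік!" s word
  else if client_age < 7 then format2 "Тобі ж {} {}! Де твої батьки?" s word
  else if client_age < 16 then format2 "Тобі лише {} {}, а це фільм для дорослих!" s word
  else if client_age ≤ 65 then format2 "Незважаючи на те що вам {} {}, білетів всеодно нема!" s word
  else if client_age < 100 then format2 "Вам {} {}? Покажіть пенсійне посвідчення!" s word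
  else format2 "Вам {} {}, відвідування кінотеатру небезбечно для вашого здоров'я!" s word

-- ===== PRECONDITION & SPEC =====
def Spec_cinema_cashier (client_age : Int) (out : String) : Prop := out = cinema_cashier_alt client_age
instance (client_age : Int) (out : String) : Decidable (Spec_cinema_cashier client_age out) := by unfold Spec_cinema_cashier; infer_instance

-- ===== CLAIM (what is proved, stated in full; the proofs are below) =====
def Claim_equal_cinema_cashier : Prop := ∀ (client_age : Int), Dom_cinema_cashier client_age → Spec_cinema_cashier client_age (cinema_cashier client_age)

-- ===== LEMMAS AND PROOFS =====
set_option maxHeartbeats 2000000 in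
theorem buildNice_eval :
    buildNice 91 11 [] = [11, 22, 33, 44, 55, 66, 77, 88, 99, 111, 222, 333, 444, 555, 666, 777, 888, 999] := by
  decide

theorem mod_ten (n : Int) : PySem.Int.mod n 10 = n % 10 :=
  PySem.Int.mod_eq_emod_of_pos (by norm_num)
theorem mod_hundred (n : Int) : PySem.Int.mod n 100 = n % 100 :=
  PySem.Int.mod_eq_emod_of_pos (by norm_num)
theorem mod_eleven (n : Int) : PySem.Int.mod n 11 = n % 11 :=
  PySem.Int.mod_eq_emod_of_pos (by norm_num)
theorem mod_oneeleven (n : Int) : PySem.Int.mod n 111 = n % 111 :=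
  PySem.Int.mod_eq_emod_of_pos (by norm_num)

-- A's dict-loop word computation equals B's direct conditional
theorem word_eq (n : Int) :
    determ_age_in_str n =
      (if PySem.Int.mod n 10 = 1 ∧ PySem.Int.mod n 100 ≠ 11 then "рік"
       else if PySem.Int.mod n 10 ∈ [(2 : Int), 3, 4] ∧ PySem.Int.mod n 100 ∉ [(12 : Int), 13, 14] then "роки"
       else "років") := by
  unfold determ_age_in_str
  simp only [determLoop]
  have key : n % 100 % 10 = n % 10 := Int.emod_emod_of_dvd n (by norm_num)
  simp only [mod_ten, mod_hundred, List.mem_cons, List.not_mem_nil, or_false, or_self]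
  split_ifs <;> first | rfl | omega

-- ===== VERDICT (by name: the statement is the Claim_ definition above) =====
set_option maxHeartbeats 1000000 in
theorem cinema_cashier_spec : Claim_equal_cinema_cashier := by
  intro n _
  unfold Spec_cinema_cashier cinema_cashier cinema_cashier_alt
  simp only [word_eq, buildNice_eval]
  have key : n % 100 % 10 = n % 10 := Int.emod_emod_of_dvd n (by norm_num)
  simp only [mod_eleven, mod_oneeleven, List.mem_cons, List.not_mem_nil, or_false]
  split_ifs <;> first | omega | rfl
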